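-- pv_equiv track=rewrite | github.com/zdodds/contributed-submissions | submissions_cs35_sp2025/submission_359/final|hw0pr1 .py | just_text
-- ===== SOURCE A (Python) =====
-- import string
--
-- def just_text( s ):
--     ''' returns lowercase string s removing all characters that aren't letters or spaces
--     '''
--     rstring2 = ''
--     lcs = s.lower()
--     text = string.ascii_lowercase + " "
--     for x in lcs:
--         if x in text:
--             rstring2 += x
--     return rstring2
-- ===== SOURCE B (Python) =====
-- import string
--
-- class _DeleteMissing(dict):
--     """Translation table: codepoints absent from the dict are deleted."""
--     def __missing__(self, key):
--         return None
--
-- def just_text(s):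
--     tbl = _DeleteMissing()
--     for c in string.ascii_lowercase + " ":
--         tbl[ord(c)] = c
--     for u, l in zip(string.ascii_uppercase, string.ascii_lowercase):
--         tbl[ord(u)] = l
--     return s.translate(tbl)
-- ===== Notes on version B (the rewrite author's own statement) =====
-- stated objective: alternative
-- what changed: Builds a 53-entry translation table once (lowercase/space map to themselves, uppercase to its lowercase, everything else deleted via __missing__) and hands the whole string to str.translate in C, replacing A's explicit per-character loop with its 27-character membership scan and repeated string concatenation.
import Mathlib
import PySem

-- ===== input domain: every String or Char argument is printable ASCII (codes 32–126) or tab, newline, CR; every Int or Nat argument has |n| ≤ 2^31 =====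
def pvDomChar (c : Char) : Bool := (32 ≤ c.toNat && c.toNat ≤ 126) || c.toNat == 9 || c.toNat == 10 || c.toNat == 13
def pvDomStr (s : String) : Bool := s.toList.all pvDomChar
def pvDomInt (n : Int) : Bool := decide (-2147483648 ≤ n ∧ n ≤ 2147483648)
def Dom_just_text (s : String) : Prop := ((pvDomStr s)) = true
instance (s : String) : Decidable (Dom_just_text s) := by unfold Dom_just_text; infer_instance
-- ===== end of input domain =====

-- B builds a 53-entry translation table once (lowercase/space -> self, uppercase -> lowercase,
-- missing codepoint -> delete) and maps the string through it, instead of A's per-character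
-- loop with a 27-character membership scan (alternative decomposition, return value only).

-- ===== PORT A =====
def just_text (s : String) : String :=
  let lcs := PySem.Str.lower s
  let text := "abcdefghijklmnopqrstuvwxyz ".toList  -- string.ascii_lowercase + " "
  -- 'x in text' on a single character is membership; ported via PySem.Chars.isIn (substring test)
  String.mk (lcs.toList.foldl (fun acc x => if PySem.Chars.isIn [x] text then acc ++ [x] else acc) [])

-- ===== PORT B =====
-- the translation table of Source B: keys are codepoints, values replacement chars; a missing key deletes
def pvTable : PySem.Dict Nat Char :=
  let tbl := "abcdefghijklmnopqrstuvwxyz ".toList.foldl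
    (fun d c => PySem.Dict.insert d c.toNat c) (PySem.Dict.ofList [])
  (List.zip "ABCDEFGHIJKLMNOPQRSTUVWXYZ".toList "abcdefghijklmnopqrstuvwxyz".toList).foldl
    (fun d p => PySem.Dict.insert d p.1.toNat p.2) tbl

-- s.translate(tbl): per codepoint, replace by tbl's value, delete when the lookup misses (__missing__)
def just_text_alt (s : String) : String :=
  String.mk (s.toList.flatMap (fun c =>
    match PySem.Dict.get? pvTable c.toNat with
    | some x => [x]
    | none => []))

-- ===== PRECONDITION & SPEC =====
def Spec_just_text (s : String) (out : String) : Prop := out = just_text_alt s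
instance (s : String) (out : String) : Decidable (Spec_just_text s out) := by unfold Spec_just_text; infer_instance

-- ===== CLAIM (what is proved, stated in full; the proofs are below) =====
def Claim_equal_just_text : Prop := ∀ (s : String), Dom_just_text s → Spec_just_text s (just_text s)

-- ===== LEMMAS AND PROOFS =====

-- per-character agreement of the two emitted fragments, over all 127 codes the domain admits
set_option maxRecDepth 16384 in
lemma perChar_fin : ∀ n : Fin 127,
    (if PySem.Chars.isIn [PySem.Chars.lowerChar (Char.ofNat n.val)] "abcdefghijklmnopqrstuvwxyz ".toList
       then [PySem.Chars.lowerChar (Char.ofNat n.val)] else [])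
    = (match PySem.Dict.get? pvTable (Char.ofNat n.val).toNat with
       | some x => [x] | none => []) := by decide

lemma perChar (c : Char) (h : pvDomChar c = true) :
    (if PySem.Chars.isIn [PySem.Chars.lowerChar c] "abcdefghijklmnopqrstuvwxyz ".toList
       then [PySem.Chars.lowerChar c] else [])
    = (match PySem.Dict.get? pvTable c.toNat with
       | some x => [x] | none => []) := by
  have hlt : c.toNat < 127 := by
    simp [pvDomChar] at h
    omega
  have hc : Char.ofNat c.toNat = c := Char.ofNat_toNat c
  have := perChar_fin ⟨c.toNat, hlt⟩
  simpa [hc] using this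

set_option maxRecDepth 32768 in
theorem Claim_proof (s : String) (hd : Dom_just_text s) : just_text s = just_text_alt s := by
  unfold just_text just_text_alt
  simp only [PySem.Str.toList_lower]
  congr 1
  have key : ∀ (l : List Char), l.all pvDomChar = true → ∀ acc : List Char,
      (PySem.Chars.lower l).foldl
        (fun acc x => if PySem.Chars.isIn [x] "abcdefghijklmnopqrstuvwxyz ".toList then acc ++ [x] else acc) acc
      = acc ++ l.flatMap (fun c => match PySem.Dict.get? pvTable c.toNat with
          | some x => [x] | none => []) := by
    intro l hl
    induction l with
    | nil => intro acc; simp [PySem.Chars.lower]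
    | cons c t ih =>
      intro acc
      simp only [List.all_cons, Bool.and_eq_true] at hl
      simp only [PySem.Chars.lower, List.map_cons, List.foldl_cons, List.flatMap_cons] at *
      rw [ih hl.2, ← List.append_assoc, ← perChar c hl.1]
      split_ifs <;> simp
  exact key s.toList hd []

-- ===== VERDICT (by name: the statement is the Claim_ definition above) =====
theorem just_text_spec : Claim_equal_just_text := by
  intro s hd
  exact Claim_proof s hd
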